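-- pv_equiv track=rewrite | github.com/Yoonkyu-Lee/sinograph-explorer | db_src/Unihan/unihan_lookup_demo.py | traverse_variant_component
-- ===== SOURCE A (Python) =====
-- from collections import deque
--
-- def traverse_variant_component(
--     start_cp: str,
--     graph: dict[str, dict[str, set[str]]],
-- ) -> tuple[list[str], list[tuple[str, str, str]]]:
--     if start_cp not in graph:
--         return [start_cp], []
--
--     # 재귀 대신 BFS를 사용해 연결된 variant 문자군 전체를 찾는다.
--     # visited가 있기 때문에 순환 참조가 있어도 무한 루프에 빠지지 않는다.
--     queue = deque([start_cp])
--     visited = {start_cp}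
--     order = [start_cp]
--     edges: set[tuple[str, str, str]] = set()
--
--     while queue:
--         current = queue.popleft()
--         for field in sorted(graph.get(current, {})):
--             for neighbor in sorted(graph[current][field]):
--                 edge_key = tuple(sorted((current, neighbor)) + [field])
--                 edges.add(edge_key)
--
--                 if neighbor not in visited:
--                     visited.add(neighbor)
--                     queue.append(neighbor)
--                     order.append(neighbor)
--
--     return order, sorted(edges)
-- ===== SOURCE B (Python) =====
-- def traverse_variant_component(
--     start_cp: str,
--     graph: dict[str, dict[str, set[str]]],
-- ) -> tuple[list[str], list[tuple[str, str, str]]]: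
--     if start_cp not in graph:
--         return [start_cp], []
--
--     def neighbors(node):
--         fields = graph.get(node, {})
--         return [nb for field in sorted(fields) for nb in sorted(fields[field])]
--
--     # Phase 1: BFS for discovery only; `order` doubles as the worklist
--     # (the cursor i walks it while new nodes are appended at the end).
--     order = [start_cp]
--     visited = {start_cp}
--     i = 0
--     while i < len(order):
--         for nb in neighbors(order[i]):
--             if nb not in visited:
--                 visited.add(nb)
--                 order.append(nb)
--         i += 1
--
--     # Phase 2: collect the undirected edge keys of the whole component.
--     edges = {(*sorted((node, nb)), field)
--              for node in order
--              for field in sorted(graph.get(node, {}))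
--              for nb in sorted(graph[node][field])}
--     return order, sorted(edges)
-- ===== Notes on version B (the rewrite author's own statement) =====
-- stated objective: alternative
-- what changed: B splits A's single deque-based BFS loop that interleaves edge collection into two phases: a discovery-only BFS in which the order list itself doubles as the worklist (a cursor walks it, no deque), using a flattened neighbors() helper, and a separate set-comprehension pass over the discovered component that collects the undirected edge keys.
import Mathlib
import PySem

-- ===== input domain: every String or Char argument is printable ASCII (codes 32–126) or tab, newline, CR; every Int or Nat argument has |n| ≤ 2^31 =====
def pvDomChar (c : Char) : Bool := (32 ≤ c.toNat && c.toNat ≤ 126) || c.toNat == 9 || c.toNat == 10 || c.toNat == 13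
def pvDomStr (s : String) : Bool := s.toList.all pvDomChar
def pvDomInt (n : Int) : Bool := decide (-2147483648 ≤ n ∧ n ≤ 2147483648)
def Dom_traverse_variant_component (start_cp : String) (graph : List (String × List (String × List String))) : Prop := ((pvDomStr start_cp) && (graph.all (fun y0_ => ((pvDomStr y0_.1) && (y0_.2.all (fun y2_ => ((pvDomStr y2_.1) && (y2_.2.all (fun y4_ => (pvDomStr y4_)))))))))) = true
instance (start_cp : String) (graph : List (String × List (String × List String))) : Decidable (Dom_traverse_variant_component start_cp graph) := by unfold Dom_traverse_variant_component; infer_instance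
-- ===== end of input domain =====

-- B restructures A's single deque-based BFS (which interleaves edge collection) into two phases:
-- a discovery-only BFS whose `order` list doubles as the worklist, then a separate edge-collection
-- pass over the discovered component; same return value (objective: alternative decomposition).

-- ---- shared transliteration helpers (expressions occurring verbatim in BOTH Python sources) ----

-- tuple(sorted((c, nb)) + [f])
def pvKey (c nb f : String) : String × String × String :=
  if nb < c then (nb, c, f) else (c, nb, f)

-- graph.get(node, {})
def pvFields (graph : List (String × List (String × List String))) (c : String) : List (String × List String) :=
  PySem.Dict.getD (PySem.Dict.mk graph) c []

-- sorted(graph.get(node, {}))  (sorted dict keys)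
def pvFieldKeys (graph : List (String × List (String × List String))) (c : String) : List String :=
  PySem.List.sorted ((pvFields graph c).map Prod.fst) (fun x => x) false

-- sorted(graph[node][field])  (sorted set elements)
def pvInner (graph : List (String × List (String × List String))) (c f : String) : List String :=
  PySem.List.sorted (PySem.Dict.getD (PySem.Dict.mk (pvFields graph c)) f []) (fun x => x) false

-- sorted(edges): Python's lexicographic sort of string triples, realized as a stable
-- three-pass sort (exact, since PySem.List.sorted is stable)
def pvSortEdges (es : List (String × String × String)) : List (String × String × String) :=
  PySem.List.sorted (PySem.List.sorted (PySem.List.sorted es (fun t => t.2.2) false) (fun t => t.2.1) false) (fun t => t.1) false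

-- ---- termination development (cited, via the measure lemmas, by the ports' decreasing_by) ----

def pvUniverse (graph : List (String × List (String × List String))) : List String :=
  graph.flatMap (fun p => p.2.flatMap (fun q => q.2))

def pvRem (graph : List (String × List (String × List String))) (v : List String) : Nat :=
  ((pvUniverse graph).toFinset.filter (fun x => x ∉ v)).card

-- the sub-sequence of first occurrences of not-yet-visited elements of L
def pvNewOf (v : PySem.Set String) (L : List String) : List String :=
  (PySem.Set.ofList L).filter (fun y => !(PySem.Set.contains v y))

-- B's neighbors(node) flattened comprehension (also names the flattened scan of A's nested loops)
def pvNbrs (graph : List (String × List (String × List String))) (c : String) : List String :=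
  (pvFieldKeys graph c).flatMap (fun f => pvInner graph c f)

-- B's phase-2 comprehension body for one node (also names A's per-node edge contributions)
def pvEdgeList (graph : List (String × List (String × List String))) (c : String) : List (String × String × String) :=
  (pvFieldKeys graph c).flatMap (fun f => (pvInner graph c f).map (fun nb => pvKey c nb f))

theorem pvNewOf_cons_mem (v : PySem.Set String) (x : String) (L : List String)
    (hx : x ∈ v) : pvNewOf v (x :: L) = pvNewOf v L := by
  have hc : PySem.Set.contains v x = true := by simp [PySem.Set.contains, hx]
  unfold pvNewOf
  rw [PySem.Set.ofList_cons]
  simp only [List.filter_cons, hc, Bool.not_true, Bool.false_eq_true, if_false]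
  rw [PySem.Set.discard, List.filter_filter]
  refine List.filter_congr ?_
  intro a _
  by_cases hax : a = x
  · subst hax; simp [hx]
  · simp [hax]

theorem pvNewOf_cons_not_mem (v : PySem.Set String) (x : String) (L : List String)
    (hx : x ∉ v) : pvNewOf v (x :: L) = x :: pvNewOf (v.add x) L := by
  have hc : PySem.Set.contains v x = false := by simp [PySem.Set.contains, hx]
  unfold pvNewOf
  rw [PySem.Set.ofList_cons, PySem.Set.add_of_not_mem hx]
  simp only [List.filter_cons, hc, Bool.not_false, if_true]
  rw [PySem.Set.discard, List.filter_filter]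
  refine congrArg (x :: ·) (List.filter_congr ?_)
  intro a _
  by_cases hax : a = x
  · subst hax; simp [PySem.Set.contains, hx]
  · simp [PySem.Set.contains, hax]

theorem pvNewOf_append (v : PySem.Set String) (L1 L2 : List String) :
    pvNewOf v (L1 ++ L2) = pvNewOf v L1 ++ pvNewOf (v.update L1) L2 := by
  induction L1 generalizing v with
  | nil => simp [pvNewOf, PySem.Set.update]
  | cons x L1 ih =>
    rw [List.cons_append, PySem.Set.update_cons]
    by_cases hx : x ∈ v
    · rw [pvNewOf_cons_mem v x _ hx, pvNewOf_cons_mem v x L1 hx, PySem.Set.add_of_mem hx, ih]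
    · rw [pvNewOf_cons_not_mem v x _ hx, pvNewOf_cons_not_mem v x L1 hx, ih, List.cons_append]

theorem pvNbrs_subset_universe (graph : List (String × List (String × List String))) (c x : String)
    (hx : x ∈ pvNbrs graph c) : x ∈ pvUniverse graph := by
  unfold pvNbrs at hx
  rw [List.mem_flatMap] at hx
  obtain ⟨f, _, hxf⟩ := hx
  unfold pvInner pvFields at hxf
  rw [PySem.List.mem_sorted] at hxf
  simp only [PySem.Dict.getD, PySem.Dict.get?] at hxf
  rcases hg : List.find? (fun p => p.1 == c) graph with _ | p
  · rw [hg] at hxf; simp at hxf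
  · rw [hg] at hxf
    simp only [Option.map_some, Option.getD_some] at hxf
    rcases hf : List.find? (fun q => q.1 == f) p.2 with _ | q
    · rw [hf] at hxf; simp at hxf
    · rw [hf] at hxf
      simp only [Option.map_some, Option.getD_some] at hxf
      unfold pvUniverse
      rw [List.mem_flatMap]
      exact ⟨p, List.mem_of_find?_eq_some hg,
        List.mem_flatMap.mpr ⟨q, List.mem_of_find?_eq_some hf, hxf⟩⟩

theorem pvRem_update (graph : List (String × List (String × List String))) (v : PySem.Set String)
    (L : List String) (hL : ∀ x ∈ L, x ∈ pvUniverse graph) :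
    pvRem graph (v.update L) + (pvNewOf v L).length = pvRem graph v := by
  unfold pvRem
  have hnd : (pvNewOf v L).Nodup := (PySem.Set.nodup_ofList L).filter _
  have hsub : (pvNewOf v L).toFinset ⊆ (pvUniverse graph).toFinset.filter (fun x => x ∉ v) := by
    intro x hxm
    rw [List.mem_toFinset] at hxm
    unfold pvNewOf at hxm
    rw [List.mem_filter] at hxm
    obtain ⟨hxo, hxc⟩ := hxm
    rw [PySem.Set.mem_ofList] at hxo
    have hxv : x ∉ v := by
      intro hxv
      simp [PySem.Set.contains, hxv] at hxc
    rw [Finset.mem_filter, List.mem_toFinset]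
    exact ⟨hL x hxo, hxv⟩
  have hmemN : ∀ x, x ∈ (pvNewOf v L).toFinset ↔ x ∈ L ∧ x ∉ v := by
    intro x
    rw [List.mem_toFinset]
    unfold pvNewOf
    rw [List.mem_filter, PySem.Set.mem_ofList]
    constructor
    · rintro ⟨h1, h2⟩
      refine ⟨h1, fun hxv => ?_⟩
      simp [PySem.Set.contains, hxv] at h2
    · rintro ⟨h1, h2⟩
      exact ⟨h1, by simp [PySem.Set.contains, h2]⟩
  have hset : (pvUniverse graph).toFinset.filter (fun x => x ∉ v.update L) =
      ((pvUniverse graph).toFinset.filter (fun x => x ∉ v)) \ (pvNewOf v L).toFinset := by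
    ext x
    simp only [Finset.mem_filter, Finset.mem_sdiff, List.mem_toFinset, PySem.Set.mem_update, hmemN]
    constructor
    · rintro ⟨hU, hn⟩
      exact ⟨⟨hU, fun h => hn (Or.inl h)⟩, fun h => hn (Or.inr h.1)⟩
    · rintro ⟨⟨hU, hv⟩, hn⟩
      refine ⟨hU, ?_⟩
      rintro (h | h)
      · exact hv h
      · exact hn ⟨h, hv⟩
  rw [hset, Finset.card_sdiff, Finset.inter_eq_left.mpr hsub, List.toFinset_card_of_nodup hnd]
  have hle := Finset.card_le_card hsub
  rw [List.toFinset_card_of_nodup hnd] at hle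
  omega

-- ===== PORT A =====
-- body of A's while-loop for one dequeued node: state = (edges, visited, queue, order)
def pvAStep (graph : List (String × List (String × List String))) (c : String)
    (st : PySem.Set (String × String × String) × PySem.Set String × List String × List String) :
    PySem.Set (String × String × String) × PySem.Set String × List String × List String :=
  (pvFieldKeys graph c).foldl (fun st f =>
    (pvInner graph c f).foldl (fun st nb =>
      let edges := st.1.add (pvKey c nb f)
      if st.2.1.contains nb then (edges, st.2)
      else (edges, (st.2.1.add nb, st.2.2.1 ++ [nb], st.2.2.2 ++ [nb]))) st) st

-- the (visited, queue, order) effect of A's innermost loop body, named so the fold factors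
def pvEnq3 (t : PySem.Set String × List String × List String) (nb : String) :
    PySem.Set String × List String × List String :=
  if t.1.contains nb then t else (t.1.add nb, t.2.1 ++ [nb], t.2.2 ++ [nb])

theorem pvAEnq_fold (L : List String) (v : PySem.Set String) (q o : List String) :
    L.foldl pvEnq3 (v, q, o) = (v.update L, q ++ pvNewOf v L, o ++ pvNewOf v L) := by
  induction L generalizing v q o with
  | nil => simp [pvNewOf, PySem.Set.update]
  | cons x L ih =>
    rw [List.foldl_cons, PySem.Set.update_cons]
    by_cases hx : x ∈ v
    · have hc : PySem.Set.contains v x = true := by simp [PySem.Set.contains, hx]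
      simp only [pvEnq3, hc, if_true]
      rw [ih, PySem.Set.add_of_mem hx, pvNewOf_cons_mem v x L hx]
    · have hc : PySem.Set.contains v x = false := by simp [PySem.Set.contains, hx]
      simp only [pvEnq3, hc, Bool.false_eq_true, if_false]
      rw [ih, pvNewOf_cons_not_mem v x L hx]
      simp [List.append_assoc]

theorem pvAFold (graph : List (String × List (String × List String))) (c : String)
    (FL : List String) (e : PySem.Set (String × String × String)) (v : PySem.Set String)
    (q o : List String) :
    FL.foldl (fun st f =>
      (pvInner graph c f).foldl (fun st nb =>
        let edges := st.1.add (pvKey c nb f)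
        if st.2.1.contains nb then (edges, st.2)
        else (edges, (st.2.1.add nb, st.2.2.1 ++ [nb], st.2.2.2 ++ [nb]))) st) (e, v, q, o) =
      (e.update (FL.flatMap (fun f => (pvInner graph c f).map (fun nb => pvKey c nb f))),
        (v.update (FL.flatMap (fun f => pvInner graph c f)),
          q ++ pvNewOf v (FL.flatMap (fun f => pvInner graph c f)),
          o ++ pvNewOf v (FL.flatMap (fun f => pvInner graph c f)))) := by
  induction FL generalizing e v q o with
  | nil => simp [pvNewOf, PySem.Set.update]
  | cons f FL ih =>
    rw [List.foldl_cons]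
    have hbody : (fun (st : PySem.Set (String × String × String) ×
          PySem.Set String × List String × List String) (nb : String) =>
        let edges := st.1.add (pvKey c nb f)
        if st.2.1.contains nb then (edges, st.2)
        else (edges, (st.2.1.add nb, st.2.2.1 ++ [nb], st.2.2.2 ++ [nb]))) =
        (fun st nb => (st.1.add (pvKey c nb f), pvEnq3 st.2 nb)) := by
      funext st nb
      by_cases h : nb ∈ st.2.1 <;> simp [pvEnq3, PySem.Set.contains, h]
    have hsplit := PySem.List.foldl_prod_mk
      (fun (es : PySem.Set (String × String × String)) nb => es.add (pvKey c nb f)) pvEnq3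
      (pvInner graph c f) e (v, q, o)
    rw [hbody, hsplit, ← PySem.Set.update_map_eq_foldl_add, pvAEnq_fold, ih]
    rw [List.flatMap_cons, List.flatMap_cons, PySem.Set.update_append, PySem.Set.update_append,
      pvNewOf_append, List.append_assoc, List.append_assoc]

theorem pvAStep_eq (graph : List (String × List (String × List String))) (c : String)
    (e : PySem.Set (String × String × String)) (v : PySem.Set String) (q o : List String) :
    pvAStep graph c (e, v, q, o) =
      (e.update (pvEdgeList graph c),
        (v.update (pvNbrs graph c), q ++ pvNewOf v (pvNbrs graph c), o ++ pvNewOf v (pvNbrs graph c))) := by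
  unfold pvAStep pvEdgeList pvNbrs
  exact pvAFold graph c (pvFieldKeys graph c) e v q o

theorem pvAStep_measure (graph : List (String × List (String × List String))) (c : String)
    (e : PySem.Set (String × String × String)) (v : PySem.Set String) (q o : List String) :
    (pvAStep graph c (e, v, q, o)).2.2.1.length + 2 * pvRem graph (pvAStep graph c (e, v, q, o)).2.1 <
      (c :: q).length + 2 * pvRem graph v := by
  rw [pvAStep_eq]
  have h := pvRem_update graph v (pvNbrs graph c) (fun x hx => pvNbrs_subset_universe graph c x hx)
  simp only [List.length_append, List.length_cons]
  omega

-- A's BFS loop: while queue: current = queue.popleft(); …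
def pvALoop (graph : List (String × List (String × List String))) (queue : List String)
    (visited : PySem.Set String) (order : List String)
    (edges : PySem.Set (String × String × String)) :
    List String × PySem.Set (String × String × String) :=
  match queue with
  | [] => (order, edges)
  | current :: rest =>
    pvALoop graph (pvAStep graph current (edges, visited, rest, order)).2.2.1
      (pvAStep graph current (edges, visited, rest, order)).2.1
      (pvAStep graph current (edges, visited, rest, order)).2.2.2
      (pvAStep graph current (edges, visited, rest, order)).1
termination_by queue.length + 2 * pvRem graph visited
decreasing_by exact pvAStep_measure graph current edges visited rest order

def traverse_variant_component (start_cp : String) (graph : List (String × List (String × List String))) : List String × (List (String × String × String)) :=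
  if (PySem.Dict.mk graph).contains start_cp = false then ([start_cp], [])
  else
    -- queue = deque([start_cp]); visited = {start_cp}; order = [start_cp]; edges = set()
    let r := pvALoop graph [start_cp] [start_cp] [start_cp] []
    (r.1, pvSortEdges r.2)

-- ===== PORT B =====
-- if nb not in visited: visited.add(nb); order.append(nb)   (state = (visited, order))
def pvEnq (st : PySem.Set String × List String) (nb : String) : PySem.Set String × List String :=
  if st.1.contains nb then st else (st.1.add nb, st.2 ++ [nb])

theorem pvEnq_fold (L : List String) (v : PySem.Set String) (o : List String) :
    L.foldl pvEnq (v, o) = (v.update L, o ++ pvNewOf v L) := by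
  induction L generalizing v o with
  | nil => simp [pvNewOf, PySem.Set.update]
  | cons x L ih =>
    rw [List.foldl_cons, PySem.Set.update_cons]
    by_cases hx : x ∈ v
    · have hc : PySem.Set.contains v x = true := by simp [PySem.Set.contains, hx]
      simp only [pvEnq, hc, if_true]
      rw [ih, PySem.Set.add_of_mem hx, pvNewOf_cons_mem v x L hx]
    · have hc : PySem.Set.contains v x = false := by simp [PySem.Set.contains, hx]
      simp only [pvEnq, hc, Bool.false_eq_true, if_false]
      rw [ih, pvNewOf_cons_not_mem v x L hx]
      simp [List.append_assoc]

theorem pvBStep_measure (graph : List (String × List (String × List String))) (o : List String)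
    (i : Nat) (v : PySem.Set String) (h : i < o.length) :
    (((pvNbrs graph o[i]).foldl pvEnq (v, o)).2.length - (i + 1)) +
        2 * pvRem graph ((pvNbrs graph o[i]).foldl pvEnq (v, o)).1 <
      (o.length - i) + 2 * pvRem graph v := by
  rw [pvEnq_fold]
  have hr := pvRem_update graph v (pvNbrs graph o[i])
    (fun x hx => pvNbrs_subset_universe graph o[i] x hx)
  simp only [List.length_append]
  omega

-- B's phase-1 loop: while i < len(order): for nb in neighbors(order[i]): …; i += 1
def pvBLoop (graph : List (String × List (String × List String))) (order : List String)
    (i : Nat) (visited : PySem.Set String) : List String :=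
  if h : i < order.length then
    pvBLoop graph ((pvNbrs graph order[i]).foldl pvEnq (visited, order)).2 (i + 1)
      ((pvNbrs graph order[i]).foldl pvEnq (visited, order)).1
  else order
termination_by (order.length - i) + 2 * pvRem graph visited
decreasing_by exact pvBStep_measure graph order i visited h

def traverse_variant_component_alt (start_cp : String) (graph : List (String × List (String × List String))) : List String × (List (String × String × String)) :=
  if (PySem.Dict.mk graph).contains start_cp = false then ([start_cp], [])
  else
    let order := pvBLoop graph [start_cp] 0 [start_cp]
    -- edges = {(*sorted((node, nb)), field) for node in order for field in … for nb in …}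
    let edges : PySem.Set (String × String × String) :=
      PySem.Set.ofList (order.flatMap (fun node => pvEdgeList graph node))
    (order, pvSortEdges edges)

-- ===== PRECONDITION & SPEC =====
def Spec_traverse_variant_component (start_cp : String) (graph : List (String × List (String × List String))) (out : List String × (List (String × String × String))) : Prop := out = traverse_variant_component_alt start_cp graph
instance (start_cp : String) (graph : List (String × List (String × List String))) (out : List String × (List (String × String × String))) : Decidable (Spec_traverse_variant_component start_cp graph out) := by unfold Spec_traverse_variant_component; infer_instance

-- ===== CLAIM (what is proved, stated in full; the proofs are below) =====
def Claim_equal_traverse_variant_component : Prop := ∀ (start_cp : String) (graph : List (String × List (String × List String))), Dom_traverse_variant_component start_cp graph → Spec_traverse_variant_component start_cp graph (traverse_variant_component start_cp graph)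

-- ===== LEMMAS AND PROOFS =====

theorem pvALoop_nil (graph : List (String × List (String × List String))) (v : PySem.Set String)
    (o : List String) (e : PySem.Set (String × String × String)) :
    pvALoop graph [] v o e = (o, e) := by rw [pvALoop]

theorem pvBLoop_stop (graph : List (String × List (String × List String))) (o : List String)
    (i : Nat) (v : PySem.Set String) (h : ¬ i < o.length) :
    pvBLoop graph o i v = o := by rw [pvBLoop]; simp [h]

theorem pvALoop_cons (graph : List (String × List (String × List String))) (c : String)
    (rest : List String) (v : PySem.Set String) (o : List String)
    (e : PySem.Set (String × String × String)) :
    pvALoop graph (c :: rest) v o e =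
      pvALoop graph (rest ++ pvNewOf v (pvNbrs graph c)) (v.update (pvNbrs graph c))
        (o ++ pvNewOf v (pvNbrs graph c)) (e.update (pvEdgeList graph c)) := by
  rw [pvALoop, pvAStep_eq]

theorem pvBLoop_step (graph : List (String × List (String × List String))) (o : List String)
    (i : Nat) (v : PySem.Set String) (h : i < o.length) :
    pvBLoop graph o i v =
      pvBLoop graph (o ++ pvNewOf v (pvNbrs graph o[i])) (i + 1)
        (v.update (pvNbrs graph o[i])) := by
  rw [pvBLoop, dif_pos h, pvEnq_fold]

theorem pvBLoop_prefix (graph : List (String × List (String × List String))) (o : List String)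
    (i : Nat) (v : PySem.Set String) : o <+: pvBLoop graph o i v := by
  fun_induction pvBLoop graph o i v
  case case2 => exact List.prefix_rfl
  case case1 o i v h ih =>
    refine List.IsPrefix.trans ?_ ih
    rw [pvEnq_fold]
    exact List.prefix_append o _

theorem pvMainStop (graph : List (String × List (String × List String))) (v : PySem.Set String)
    (o : List String) (i : Nat) (e : PySem.Set (String × String × String))
    (hi : o.length ≤ i) :
    pvALoop graph (o.drop i) v o e =
      (pvBLoop graph o i v,
        e.update (((pvBLoop graph o i v).drop i).flatMap (fun c => pvEdgeList graph c))) := by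
  have hd : o.drop i = [] := List.drop_eq_nil_of_le hi
  rw [hd, pvALoop_nil, pvBLoop_stop graph o i v (by omega), hd]
  simp [PySem.Set.update]

theorem pvMain (graph : List (String × List (String × List String))) :
    ∀ (n : Nat) (v : PySem.Set String) (o : List String) (i : Nat)
      (e : PySem.Set (String × String × String)),
      (o.length - i) + 2 * pvRem graph v ≤ n → i ≤ o.length →
      pvALoop graph (o.drop i) v o e =
        (pvBLoop graph o i v,
          e.update (((pvBLoop graph o i v).drop i).flatMap (fun c => pvEdgeList graph c))) := by
  intro n
  induction n with
  | zero =>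
    intro v o i e hm hi
    exact pvMainStop graph v o i e (by omega)
  | succ n IH =>
    intro v o i e hm hi
    by_cases h : i < o.length
    · have hdrop : o.drop i = o[i] :: o.drop (i + 1) := List.drop_eq_getElem_cons h
      have hrem := pvRem_update graph v (pvNbrs graph o[i])
        (fun x hx => pvNbrs_subset_universe graph o[i] x hx)
      have hq : (o ++ pvNewOf v (pvNbrs graph o[i])).drop (i + 1) =
          o.drop (i + 1) ++ pvNewOf v (pvNbrs graph o[i]) :=
        List.drop_append_of_le_length (by omega)
      rw [hdrop, pvALoop_cons, ← hq,
        IH (v.update (pvNbrs graph o[i])) (o ++ pvNewOf v (pvNbrs graph o[i])) (i + 1)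
          (e.update (pvEdgeList graph o[i]))
          (by simp only [List.length_append]; omega)
          (by simp only [List.length_append]; omega),
        ← pvBLoop_step graph o i v h]
      obtain ⟨ext, hext⟩ := pvBLoop_prefix graph (o ++ pvNewOf v (pvNbrs graph o[i])) (i + 1)
        (v.update (pvNbrs graph o[i]))
      rw [pvBLoop_step graph o i v h]
      have hofd : (pvBLoop graph (o ++ pvNewOf v (pvNbrs graph o[i])) (i + 1)
            (v.update (pvNbrs graph o[i]))).drop i =
          o[i] :: (pvBLoop graph (o ++ pvNewOf v (pvNbrs graph o[i])) (i + 1)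
            (v.update (pvNbrs graph o[i]))).drop (i + 1) := by
        rw [← hext, List.append_assoc, List.drop_append_of_le_length (by omega),
          List.drop_append_of_le_length (by omega), hdrop, List.cons_append]
      rw [hofd, List.flatMap_cons, PySem.Set.update_append]
    · exact pvMainStop graph v o i e (by omega)

-- ===== VERDICT (by name: the statement is the Claim_ definition above) =====
theorem traverse_variant_component_spec : Claim_equal_traverse_variant_component := by
  intro s g _
  unfold Spec_traverse_variant_component traverse_variant_component traverse_variant_component_alt
  by_cases hc : (PySem.Dict.mk g).contains s = false
  · rw [if_pos hc, if_pos hc]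
  · rw [if_neg hc, if_neg hc]
    have hm := pvMain g (1 + 2 * pvRem g [s]) [s] [s] 0 [] (by simp) (by simp)
    rw [List.drop_zero] at hm
    simp only [hm, List.drop_zero, PySem.Set.update_nil_left]
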